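-- pv_equiv track=rewrite | github.com/justinaxelberg-coder/inep-compare | convergence/reliability_rules.py | classify_institution_strength
-- ===== SOURCE A (Python) =====
-- INSTITUTION_GOLD = "ror"
--
-- INSTITUTION_WEAK = "name_match"
--
-- INSTITUTION_NONE = "none"
--
-- def classify_institution_strength(work: dict) -> str:
--     for institution in work.get("institutions") or []:
--         if institution.get("ror"):
--             return INSTITUTION_GOLD
--     for institution in work.get("institutions") or []:
--         if institution.get("matched_name") or institution.get("name"):
--             return INSTITUTION_WEAK
--     return INSTITUTION_NONE
-- ===== SOURCE B (Python) =====
-- INSTITUTION_GOLD = "ror"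
--
-- INSTITUTION_WEAK = "name_match"
--
-- INSTITUTION_NONE = "none"
--
-- def classify_institution_strength(work: dict) -> str:
--     weak_seen = False
--     for institution in work.get("institutions") or []:
--         if institution.get("ror"):
--             return INSTITUTION_GOLD
--         if institution.get("matched_name") or institution.get("name"):
--             weak_seen = True
--     return INSTITUTION_WEAK if weak_seen else INSTITUTION_NONE
-- ===== Notes on version B (the rewrite author's own statement) =====
-- stated objective: simpler
-- what changed: Replaces A's two passes over the institutions list with a single pass that returns GOLD on the first ror and records weak matches in a flag decided after the loop.
import Mathlib
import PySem

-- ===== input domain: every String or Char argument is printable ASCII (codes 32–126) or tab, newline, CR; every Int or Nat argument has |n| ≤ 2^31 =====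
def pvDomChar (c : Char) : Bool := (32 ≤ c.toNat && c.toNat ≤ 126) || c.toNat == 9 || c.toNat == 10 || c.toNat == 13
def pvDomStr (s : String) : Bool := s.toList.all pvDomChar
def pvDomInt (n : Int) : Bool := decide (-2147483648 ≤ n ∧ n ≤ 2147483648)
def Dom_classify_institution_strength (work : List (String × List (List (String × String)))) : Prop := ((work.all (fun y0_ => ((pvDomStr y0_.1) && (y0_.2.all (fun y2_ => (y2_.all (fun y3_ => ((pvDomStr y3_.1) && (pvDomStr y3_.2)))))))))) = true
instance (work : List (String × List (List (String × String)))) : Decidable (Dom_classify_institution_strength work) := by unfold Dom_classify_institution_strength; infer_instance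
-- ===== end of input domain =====

-- B does the same classification in ONE pass (flag for weak matches, decided after the loop)
-- instead of A's two passes over the institutions list; return value only, no side effects.

-- ===== PORT A =====
-- work.get("institutions") or []  (a missing key and an empty list both iterate as [])
def pvInsts (work : List (String × List (List (String × String)))) :
    List (List (String × String)) :=
  (PySem.Dict.get? (PySem.Dict.mk work) "institutions").getD []

-- first loop: return "ror" on the first institution with a truthy 'ror'
def pvLoopRor : List (List (String × String)) → Option String
  | [] => none
  | i :: rest =>
    if PySem.Dict.getD (PySem.Dict.mk i) "ror" "" ≠ "" then some "ror" else pvLoopRor rest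

-- second loop: return "name_match" on the first truthy 'matched_name' or 'name'
def pvLoopName : List (List (String × String)) → String
  | [] => "none"
  | i :: rest =>
    if PySem.Dict.getD (PySem.Dict.mk i) "matched_name" "" ≠ "" ∨ PySem.Dict.getD (PySem.Dict.mk i) "name" "" ≠ "" then
      "name_match"
    else pvLoopName rest

def classify_institution_strength (work : List (String × List (List (String × String)))) : String :=
  match pvLoopRor (pvInsts work) with
  | some s => s
  | none => pvLoopName (pvInsts work)

-- ===== PORT B =====
-- single pass carrying the weak_seen flag
def pvScan (weakSeen : Bool) : List (List (String × String)) → String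
  | [] => if weakSeen then "name_match" else "none"
  | i :: rest =>
    if PySem.Dict.getD (PySem.Dict.mk i) "ror" "" ≠ "" then "ror"
    else
      pvScan (weakSeen || decide (PySem.Dict.getD (PySem.Dict.mk i) "matched_name" "" ≠ "")
                       || decide (PySem.Dict.getD (PySem.Dict.mk i) "name" "" ≠ "")) rest

def classify_institution_strength_alt (work : List (String × List (List (String × String)))) : String :=
  pvScan false ((PySem.Dict.get? (PySem.Dict.mk work) "institutions").getD [])

-- ===== PRECONDITION & SPEC =====
def Spec_classify_institution_strength (work : List (String × List (List (String × String)))) (out : String) : Prop := out = classify_institution_strength_alt work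
instance (work : List (String × List (List (String × String)))) (out : String) : Decidable (Spec_classify_institution_strength work out) := by unfold Spec_classify_institution_strength; infer_instance

-- ===== CLAIM (what is proved, stated in full; the proofs are below) =====
def Claim_equal_classify_institution_strength : Prop := ∀ (work : List (String × List (List (String × String)))), Dom_classify_institution_strength work → Spec_classify_institution_strength work (classify_institution_strength work)

-- ===== LEMMAS AND PROOFS =====

-- Has any institution in l a truthy 'ror'?
def pvHasRor (l : List (List (String × String))) : Bool :=
  l.any (fun i => PySem.Dict.getD (PySem.Dict.mk i) "ror" "" ≠ "")

-- Has any institution in l a truthy 'matched_name' or 'name'?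
def pvHasWeak (l : List (List (String × String))) : Bool :=
  l.any (fun i => PySem.Dict.getD (PySem.Dict.mk i) "matched_name" "" ≠ "" || PySem.Dict.getD (PySem.Dict.mk i) "name" "" ≠ "")

theorem pvLoopRor_char (l : List (List (String × String))) :
    pvLoopRor l = if pvHasRor l then some "ror" else none := by
  induction l with
  | nil => simp [pvLoopRor, pvHasRor]
  | cons i rest ih =>
    simp only [pvLoopRor, pvHasRor, List.any_cons] at *
    by_cases h : PySem.Dict.getD (PySem.Dict.mk i) "ror" "" ≠ "" <;> simp [h, ih]

theorem pvLoopName_char (l : List (List (String × String))) :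
    pvLoopName l = if pvHasWeak l then "name_match" else "none" := by
  induction l with
  | nil => simp [pvLoopName, pvHasWeak]
  | cons i rest ih =>
    simp only [pvLoopName, pvHasWeak, List.any_cons] at *
    by_cases h : PySem.Dict.getD (PySem.Dict.mk i) "matched_name" "" ≠ "" ∨ PySem.Dict.getD (PySem.Dict.mk i) "name" "" ≠ "" <;>
      simp [h, ih]


theorem pvScan_char (l : List (List (String × String))) : ∀ (w : Bool),
    pvScan w l = if pvHasRor l then "ror"
                 else if w || pvHasWeak l then "name_match" else "none" := by
  induction l with
  | nil => intro w; simp [pvScan, pvHasRor, pvHasWeak]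
  | cons i rest ih =>
    intro w
    simp only [pvScan, pvHasRor, pvHasWeak, List.any_cons] at *
    by_cases h : PySem.Dict.getD (PySem.Dict.mk i) "ror" "" ≠ "" <;>
      simp [h, ih, Bool.or_assoc]

-- ===== VERDICT (by name: the statement is the Claim_ definition above) =====
theorem classify_institution_strength_spec : Claim_equal_classify_institution_strength := by
  intro work _
  unfold Spec_classify_institution_strength classify_institution_strength
    classify_institution_strength_alt pvInsts
  rw [pvLoopRor_char, pvScan_char]
  by_cases h : pvHasRor ((PySem.Dict.get? (PySem.Dict.mk work) "institutions").getD []) <;>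
    simp [h, pvLoopName_char]
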